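-- pv_equiv track=rewrite | github.com/DavidAkaFunky/AdventOfCode2020 | Day06/day06.py | part1
-- ===== SOURCE A (Python) =====
-- def part1(input):
--     reply = ""
--     total = 0
--     for line in input:
--         if line != "":
--             reply += line
--         else:
--             total += len(set(reply))
--             reply = ""
--     if reply != "":
--         total += len(set(reply))
--     return total
-- ===== SOURCE B (Python) =====
-- def part1(input):
--     total = 0
--     rest = input
--     while "" in rest:
--         i = rest.index("")
--         total += len(set("".join(rest[:i])))
--         rest = rest[i + 1:]
--     return total + len(set("".join(rest)))
-- ===== Notes on version B (the rewrite author's own statement) =====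
-- stated objective: alternative
-- what changed: B repeatedly locates the first blank separator with index and counts the joined segment before it via slicing, instead of A's line-by-line state machine with a reply buffer and a trailing flush.
import Mathlib
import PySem

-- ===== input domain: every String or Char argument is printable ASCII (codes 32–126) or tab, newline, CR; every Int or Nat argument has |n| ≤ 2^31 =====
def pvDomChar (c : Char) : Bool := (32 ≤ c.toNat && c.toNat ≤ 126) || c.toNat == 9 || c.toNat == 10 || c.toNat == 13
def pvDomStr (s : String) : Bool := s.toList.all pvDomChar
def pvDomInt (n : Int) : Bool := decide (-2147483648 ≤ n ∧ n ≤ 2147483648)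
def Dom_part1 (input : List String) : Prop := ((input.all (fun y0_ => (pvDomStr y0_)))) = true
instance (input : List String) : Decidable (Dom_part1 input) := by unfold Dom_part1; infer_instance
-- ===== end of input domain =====

-- B replaces A's line-by-line reply buffer + trailing flush by repeated
-- find-first-blank / slice-and-count segment processing (alternative decomposition).

-- ===== PORT A =====
def part1Go (reply : List Char) (total : Int) : List String → Int
  | [] => if reply ≠ [] then total + ((PySem.Set.ofList reply).length : Int) else total
  | l :: rest =>
    if l ≠ "" then part1Go (reply ++ l.toList) total rest
    else part1Go [] (total + ((PySem.Set.ofList reply).length : Int)) rest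

def part1 (input : List String) : Int := part1Go [] 0 input

-- ===== PORT B =====
-- the while loop of Source B: '"" in rest' + 'rest.index("")' are one index? match;
-- rest[:i] / rest[i+1:] are take i / drop (i+1), exact since 0 ≤ i < len(rest).
def altLoop (total : Int) (rest : List String) : Int :=
  match h : PySem.List.index? rest "" with
  | some i =>
      altLoop (total + ((PySem.Set.ofList ((rest.take i).flatMap String.toList)).length : Int))
        (rest.drop (i + 1))
  | none => total + ((PySem.Set.ofList (rest.flatMap String.toList)).length : Int)
  termination_by rest.length
  decreasing_by
    have := PySem.List.getElem_of_index?_eq_some h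
    obtain ⟨hk, -, -⟩ := this
    simp only [List.length_drop]
    omega

def part1_alt (input : List String) : Int := altLoop 0 input

-- ===== PRECONDITION & SPEC =====
def Spec_part1 (input : List String) (out : Int) : Prop := out = part1_alt input
instance (input : List String) (out : Int) : Decidable (Spec_part1 input out) := by unfold Spec_part1; infer_instance

-- ===== CLAIM (what is proved, stated in full; the proofs are below) =====
def Claim_equal_part1 : Prop := ∀ (input : List String), Dom_part1 input → Spec_part1 input (part1 input)

-- ===== LEMMAS AND PROOFS =====

-- Processing a blank-free prefix just accumulates its characters into reply.
theorem part1Go_noblank (pre : List String) (hpre : "" ∉ pre) :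
    ∀ (reply : List Char) (total : Int) (ys : List String),
      part1Go reply total (pre ++ ys) = part1Go (reply ++ pre.flatMap String.toList) total ys := by
  induction pre with
  | nil => intro reply total ys; simp
  | cons l rest ih =>
    intro reply total ys
    have hl : l ≠ "" := fun h => hpre (by simp [h])
    have hrest : "" ∉ rest := fun h => hpre (List.mem_cons_of_mem _ h)
    simp only [List.cons_append, part1Go, ne_eq, hl, not_false_eq_true, if_true]
    rw [ih hrest]
    simp

-- Main invariant: A's loop from an empty reply computes total + B's loop from 0,
-- i.e. altLoop is the "rest of the work".
theorem part1Go_eq_altLoop (xs : List String) : ∀ (total : Int),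
    part1Go [] total xs = altLoop total xs := by
  induction hn : xs.length using Nat.strong_induction_on generalizing xs with
  | _ n ih =>
    intro total
    rw [altLoop]
    split
    case _ i h =>
      obtain ⟨pre, suf, hxs, hlen, hmem⟩ := (PySem.List.index?_eq_some_iff _ _ _).mp h
      subst hxs
      have htake : (pre ++ "" :: suf).take i = pre := by
        rw [← hlen, List.take_left]
      have hdrop : (pre ++ "" :: suf).drop (i + 1) = suf := by
        rw [← hlen, show pre ++ "" :: suf = (pre ++ [""]) ++ suf by simp,
          show pre.length + 1 = (pre ++ [""]).length by simp, List.drop_left]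
      rw [part1Go_noblank pre hmem]
      simp only [part1Go, ne_eq, not_true_eq_false, if_false]
      rw [htake, hdrop]
      have hsuf : suf.length < n := by simp at hn; omega
      rw [ih suf.length hsuf suf rfl]
      simp
    case _ h =>
      have hmem : "" ∉ xs := (PySem.List.index?_eq_none_iff _ _).mp h
      have := part1Go_noblank xs hmem [] total []
      simp only [List.append_nil, List.nil_append] at this
      rw [this]
      by_cases hx : xs.flatMap String.toList = []
      · simp [part1Go, hx, PySem.Set.ofList]
      · simp [part1Go, hx]

-- ===== VERDICT (by name: the statement is the Claim_ definition above) =====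
theorem part1_spec : Claim_equal_part1 := by
  intro input _
  unfold Spec_part1 part1 part1_alt
  exact part1Go_eq_altLoop input 0
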